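-- pv_equiv track=rewrite | github.com/lumen-org/modelbase | utils.py | shortest_interval
-- ===== SOURCE A (Python) =====
-- def shortest_interval(seq):
--     """ Given a sequence of intervals (i.e. a 2-tuple or a 2-element list), return the index of the shortest interval"""
--     width = [s[1] - s[0] for s in seq]
--     try:
--         min_ = min(width)
--         idx = width.index(min_)
--         return idx
-- #        return seq[idx]
--     except ValueError:
--         # min() arg is an empty sequence
--         return None
-- ===== SOURCE B (Python) =====
-- def shortest_interval(seq):
--     """ Given a sequence of intervals (i.e. a 2-tuple or a 2-element list), return the index of the shortest interval"""
--     best_idx = None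
--     best_width = None
--     for i, s in enumerate(seq):
--         w = s[1] - s[0]
--         if best_width is None or w < best_width:
--             best_width = w
--             best_idx = i
--     return best_idx
-- ===== Notes on version B (the rewrite author's own statement) =====
-- stated objective: simpler
-- what changed: Replaced the build-a-width-list + min() + list.index() (three passes and an auxiliary list) by a single enumerate loop tracking the best index and width with strict '<' so the first minimum wins.
import Mathlib
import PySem

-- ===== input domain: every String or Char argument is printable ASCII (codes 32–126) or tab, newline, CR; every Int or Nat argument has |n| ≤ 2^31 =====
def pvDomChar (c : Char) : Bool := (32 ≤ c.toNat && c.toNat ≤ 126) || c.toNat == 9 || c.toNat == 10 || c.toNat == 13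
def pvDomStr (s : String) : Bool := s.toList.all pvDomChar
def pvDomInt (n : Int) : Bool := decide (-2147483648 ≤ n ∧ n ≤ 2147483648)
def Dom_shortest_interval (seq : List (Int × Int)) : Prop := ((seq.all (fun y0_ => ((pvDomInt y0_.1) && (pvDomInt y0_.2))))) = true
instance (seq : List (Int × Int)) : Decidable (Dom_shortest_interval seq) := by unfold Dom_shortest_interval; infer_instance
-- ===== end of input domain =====

-- B replaces A's width-list + min() + list.index() (three passes, extra list) by one
-- enumerate loop tracking the best index/width (strict '<', so the first minimum wins).


-- ===== PORT A =====
def shortest_interval (seq : List (Int × Int)) : Option Int :=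
  let width := seq.map (fun s => s.2 - s.1)
  match PySem.List.min? width (fun x => x) with
  | none => none            -- min() of an empty sequence: ValueError, caught → None
  | some m =>
    match PySem.List.index? width m with
    | none => none          -- unreachable: index of the minimum always exists
    | some idx => some (idx : Int)

-- ===== PORT B =====
def siLoop : List (Int × (Int × Int)) → Option Int → Option Int → Option Int
  | [], best_idx, _ => best_idx
  | (i, s) :: rest, best_idx, best_width =>
    let w := s.2 - s.1
    match best_width with
    | none => siLoop rest (some i) (some w)
    | some b => if w < b then siLoop rest (some i) (some w) else siLoop rest best_idx best_width

def shortest_interval_alt (seq : List (Int × Int)) : Option Int :=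
  siLoop (PySem.List.enumerate seq 0) none none

-- ===== PRECONDITION & SPEC =====
def Spec_shortest_interval (seq : List (Int × Int)) (out : Option Int) : Prop := out = shortest_interval_alt seq
instance (seq : List (Int × Int)) (out : Option Int) : Decidable (Spec_shortest_interval seq out) := by unfold Spec_shortest_interval; infer_instance

-- ===== CLAIM (what is proved, stated in full; the proofs are below) =====
def Claim_equal_shortest_interval : Prop := ∀ (seq : List (Int × Int)), Dom_shortest_interval seq → Spec_shortest_interval seq (shortest_interval seq)

-- ===== LEMMAS AND PROOFS =====

/-- running minimum of `b` and the widths of the enumerated tail -/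
def wmin (b : Int) (el : List (Int × (Int × Int))) : Int :=
  el.foldl (fun acc e => min acc (e.2.2 - e.2.1)) b

lemma wmin_le : ∀ (el : List (Int × (Int × Int))) (b : Int), wmin b el ≤ b := by
  intro el
  induction el with
  | nil => intro b; simp [wmin]
  | cons e rest ih =>
    intro b
    have h := ih (min b (e.2.2 - e.2.1))
    simp only [wmin, List.foldl_cons] at h ⊢
    exact le_trans h (min_le_left _ _)

lemma siLoop_key : ∀ (el : List (Int × (Int × Int))) (j b : Int),
    siLoop el (some j) (some b) =
      if b ≤ wmin b el then some j
      else ((el.find? (fun e => e.2.2 - e.2.1 == wmin b el)).map (·.1)) := by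
  intro el
  induction el with
  | nil => intro j b; simp [siLoop, wmin]
  | cons e rest ih =>
    intro j b
    have hw : wmin b (e :: rest) = wmin (min b (e.2.2 - e.2.1)) rest := by
      simp [wmin]
    obtain ⟨i, s⟩ := e
    simp only [siLoop]
    by_cases hlt : s.2 - s.1 < b
    · have hmin : min b (s.2 - s.1) = s.2 - s.1 := min_eq_right (le_of_lt hlt)
      rw [if_pos hlt, ih i (s.2 - s.1)]
      have hwle := wmin_le rest (s.2 - s.1)
      have hnb : ¬ b ≤ wmin b ((i, s) :: rest) := by
        rw [hw]; simp only [hmin]; omega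
      rw [if_neg hnb]
      by_cases hle : s.2 - s.1 ≤ wmin (s.2 - s.1) rest
      · have heq : s.2 - s.1 = wmin b ((i, s) :: rest) := by
          rw [hw]; simp only [hmin]; omega
        rw [if_pos hle, List.find?_cons_of_pos]
        · simp
        · simpa using heq
      · rw [if_neg hle, List.find?_cons_of_neg]
        · congr 1
          rw [hw]; simp only [hmin, wmin]
        · have : wmin b ((i, s) :: rest) < s.2 - s.1 := by
            rw [hw]; simp only [hmin]; omega
          simpa using (ne_of_gt this)
    · have hmin : min b (s.2 - s.1) = b := min_eq_left (by omega)
      rw [if_neg hlt, ih j b]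
      have hwrw : wmin b ((i, s) :: rest) = wmin b rest := by
        rw [hw, hmin]
      by_cases hble : b ≤ wmin b rest
      · rw [if_pos hble, hwrw, if_pos hble]
      · rw [if_neg hble, hwrw, if_neg hble, List.find?_cons_of_neg]
        have : wmin b rest < s.2 - s.1 := by
          have := wmin_le rest b; omega
        simpa using (ne_of_gt this)

lemma wmin_enumerate : ∀ (xs : List (Int × Int)) (s b : Int),
    wmin b (PySem.List.enumerate xs s) = (xs.map (fun p => p.2 - p.1)).foldl min b := by
  intro xs
  induction xs with
  | nil => intro s b; simp [wmin, PySem.List.enumerate_nil]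
  | cons x rest ih =>
    intro s b
    rw [PySem.List.enumerate_cons]
    simp only [wmin, List.foldl_cons, List.map_cons]
    exact ih (s + 1) (min b (x.2 - x.1))

lemma find_enumerate : ∀ (xs : List (Int × Int)) (s m : Int),
    ((PySem.List.enumerate xs s).find? (fun e => e.2.2 - e.2.1 == m)).map (·.1)
      = (PySem.List.index? (xs.map (fun p => p.2 - p.1)) m).map (fun n => s + (n : Int)) := by
  intro xs
  induction xs with
  | nil => intro s m; simp [PySem.List.enumerate_nil, PySem.List.index?_eq_idxOf?]
  | cons x rest ih =>
    intro s m
    rw [PySem.List.enumerate_cons]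
    by_cases h : x.2 - x.1 = m
    · rw [List.find?_cons_of_pos (by simpa using h)]
      rw [List.map_cons, h, PySem.List.index?_cons_self]
      simp
    · rw [List.find?_cons_of_neg (by simpa using h)]
      rw [List.map_cons, PySem.List.index?_cons_of_ne _ h, ih (s + 1) m]
      cases PySem.List.index? (rest.map (fun p => p.2 - p.1)) m with
      | none => simp
      | some k => simp; push_cast; omega

lemma foldl_min_le : ∀ (l : List Int) (b : Int), l.foldl min b ≤ b := by
  intro l
  induction l with
  | nil => intro b; simp
  | cons x rest ih =>
    intro b
    exact le_trans (ih (min b x)) (min_le_left _ _)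

lemma foldl_min_mem : ∀ (l : List Int) (b : Int), l.foldl min b = b ∨ l.foldl min b ∈ l := by
  intro l
  induction l with
  | nil => intro b; simp
  | cons x rest ih =>
    intro b
    rcases ih (min b x) with h | h
    · rw [List.foldl_cons, h]
      rcases le_total b x with hbx | hxb
      · left; exact min_eq_left hbx
      · right; rw [min_eq_right hxb]; exact List.mem_cons_self
    · right; exact List.mem_cons_of_mem _ h

-- ===== VERDICT (by name: the statement is the Claim_ definition above) =====
theorem shortest_interval_spec : Claim_equal_shortest_interval := by
  intro seq _
  unfold Spec_shortest_interval shortest_interval shortest_interval_alt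
  cases seq with
  | nil => simp [PySem.List.enumerate_nil, siLoop, PySem.List.min?]
  | cons x xs =>
    rw [PySem.List.enumerate_cons]
    simp only [List.map_cons, PySem.List.min?_id_cons, siLoop]
    set ws := xs.map (fun p => p.2 - p.1) with hws
    set m := ws.foldl min (x.2 - x.1) with hm
    rw [siLoop_key, wmin_enumerate]
    rw [← hws, ← hm]
    have hmle : m ≤ x.2 - x.1 := foldl_min_le ws (x.2 - x.1)
    by_cases hle : x.2 - x.1 ≤ m
    · have heq : x.2 - x.1 = m := le_antisymm hle hmle
      rw [if_pos hle, heq, PySem.List.index?_cons_self]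
      rfl
    · rw [if_neg hle]
      have hne : x.2 - x.1 ≠ m := by omega
      have hmem : m ∈ ws := by
        rcases foldl_min_mem ws (x.2 - x.1) with h | h
        · omega
        · exact h
      obtain ⟨k, hk⟩ := Option.isSome_iff_exists.mp ((PySem.List.index?_isSome_iff ws m).mpr hmem)
      rw [PySem.List.index?_cons_of_ne _ hne, find_enumerate, hk]
      simp
      omega
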